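-- pv_equiv track=rewrite | github.com/EmilioPeJu/problems | codefights/houseOfCats.py | houseOfCats
-- ===== SOURCE A (Python) =====
-- def houseOfCats(legs):
--     if legs==0:
--         return [0]
--     persons=0
--     ans=[]
--     while persons*2<=legs:
--         if (legs-persons*2)%4==0:
--             ans.append(persons)
--         persons+=1
--     return ans
-- ===== SOURCE B (Python) =====
-- def houseOfCats(legs):
--     # Closed form: valid person-counts are the arithmetic progression of the
--     # right parity from `start` up to legs // 2, step 2; no per-candidate test.
--     if legs < 0 or legs % 2 != 0:
--         return []
--     start = 0 if legs % 4 == 0 else 1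
--     return list(range(start, legs // 2 + 1, 2))
-- ===== Notes on version B (the rewrite author's own statement) =====
-- stated objective: faster
-- what changed: Replaces the per-candidate loop with a modulo test on every persons value by a parity-derived closed form that emits the arithmetic progression range(start, legs//2+1, 2) directly.
import Mathlib
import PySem

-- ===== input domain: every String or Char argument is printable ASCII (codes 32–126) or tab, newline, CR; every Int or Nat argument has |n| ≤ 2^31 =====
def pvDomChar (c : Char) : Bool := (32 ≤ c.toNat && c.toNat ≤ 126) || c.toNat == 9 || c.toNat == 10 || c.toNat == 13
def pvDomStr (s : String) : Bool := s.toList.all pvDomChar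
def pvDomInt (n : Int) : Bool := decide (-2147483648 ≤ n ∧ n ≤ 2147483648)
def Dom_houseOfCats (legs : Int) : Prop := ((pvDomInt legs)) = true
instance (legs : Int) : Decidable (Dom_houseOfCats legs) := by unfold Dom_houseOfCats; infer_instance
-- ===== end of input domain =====

-- B replaces A's per-candidate modulo-test loop by the closed-form arithmetic
-- progression range(start, legs//2+1, 2) with start derived from legs' parity.

-- ===== PORT A =====
-- the while loop of A: state (persons, ans)
def houseOfCatsLoop (legs persons : Int) (ans : List Int) : List Int :=
  if _h : persons * 2 ≤ legs then
    houseOfCatsLoop legs (persons + 1)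
      (if PySem.Int.mod (legs - persons * 2) 4 = 0 then ans ++ [persons] else ans)
  else ans
termination_by (legs - persons * 2 + 2).toNat
decreasing_by omega

def houseOfCats (legs : Int) : List Int :=
  if legs = 0 then [0] else houseOfCatsLoop legs 0 []

-- ===== PORT B =====
def houseOfCats_alt (legs : Int) : List Int :=
  if legs < 0 ∨ PySem.Int.mod legs 2 ≠ 0 then []
  else
    PySem.List.pyRange (if PySem.Int.mod legs 4 = 0 then 0 else 1)
      (PySem.Int.floordiv legs 2 + 1) 2

-- ===== PRECONDITION & SPEC =====
def Spec_houseOfCats (legs : Int) (out : List Int) : Prop := out = houseOfCats_alt legs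
instance (legs : Int) (out : List Int) : Decidable (Spec_houseOfCats legs out) := by unfold Spec_houseOfCats; infer_instance

-- ===== CLAIM (what is proved, stated in full; the proofs are below) =====
def Claim_equal_houseOfCats : Prop := ∀ (legs : Int), Dom_houseOfCats legs → Spec_houseOfCats legs (houseOfCats legs)

-- ===== LEMMAS AND PROOFS =====

lemma pyRange_two_nil {a b : Int} (h : b ≤ a) : PySem.List.pyRange a b 2 = [] := by
  rw [PySem.List.pyRange_of_pos a b (by norm_num)]
  simp [show ¬ a < b by omega]

lemma pyRange_two_cons {a b : Int} (h : a < b) :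
    PySem.List.pyRange a b 2 = a :: PySem.List.pyRange (a + 2) b 2 := by
  rw [PySem.List.pyRange_of_pos a b (by norm_num),
      PySem.List.pyRange_of_pos (a + 2) b (by norm_num)]
  have hcount : (if a < b then ((b - a + 2 - 1) / 2).toNat else 0)
      = (if a + 2 < b then ((b - (a + 2) + 2 - 1) / 2).toNat else 0) + 1 := by
    split_ifs <;> omega
  rw [hcount, List.range_succ_eq_map, List.map_cons, List.map_map]
  refine congrArg₂ _ (by simp) (List.map_congr_left ?_)
  intro k _
  simp [Function.comp]
  push_cast
  ring

lemma loop_of_odd (legs p : Int) (ans : List Int) (hodd : ¬ (2 ∣ legs)) :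
    houseOfCatsLoop legs p ans = ans := by
  unfold houseOfCatsLoop
  split
  · rw [if_neg, loop_of_odd legs (p + 1) ans hodd]
    intro hc
    have := (PySem.Int.mod_eq_zero_iff_dvd _ _).mp hc
    exact hodd (by omega)
  · rfl
termination_by (legs - p * 2 + 2).toNat
decreasing_by omega

lemma loop_eq (legs : Int) (heven : 2 ∣ legs) (p : Int) (ans : List Int) :
    houseOfCatsLoop legs p ans =
      ans ++ PySem.List.pyRange (if PySem.Int.mod (legs - p * 2) 4 = 0 then p else p + 1)
        (PySem.Int.floordiv legs 2 + 1) 2 := by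
  have hfd : PySem.Int.floordiv legs 2 = legs / 2 :=
    PySem.Int.floordiv_eq_ediv_of_pos (by norm_num)
  unfold houseOfCatsLoop
  split
  · rename_i h
    rw [loop_eq legs heven (p + 1)]
    by_cases hc : PySem.Int.mod (legs - p * 2) 4 = 0
    · have h4 : (4 : Int) ∣ legs - p * 2 := (PySem.Int.mod_eq_zero_iff_dvd _ _).mp hc
      have hc' : ¬ PySem.Int.mod (legs - (p + 1) * 2) 4 = 0 := by
        intro hx
        have := (PySem.Int.mod_eq_zero_iff_dvd _ _).mp hx
        omega
      rw [if_pos hc, if_neg hc', if_pos hc]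
      rw [pyRange_two_cons (show p < PySem.Int.floordiv legs 2 + 1 by omega)]
      simp [show p + 1 + 1 = p + 2 from by ring]
    · have h4 : ¬ (4 : Int) ∣ legs - p * 2 := fun hx =>
        hc ((PySem.Int.mod_eq_zero_iff_dvd _ _).mpr hx)
      have hc' : PySem.Int.mod (legs - (p + 1) * 2) 4 = 0 :=
        (PySem.Int.mod_eq_zero_iff_dvd _ _).mpr (by omega)
      rw [if_neg hc, if_pos hc', if_neg hc]
  · rename_i h
    split
    · rw [pyRange_two_nil (by omega), List.append_nil]
    · rw [pyRange_two_nil (by omega), List.append_nil]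
termination_by (legs - p * 2 + 2).toNat
decreasing_by omega

-- ===== VERDICT (by name: the statement is the Claim_ definition above) =====
theorem houseOfCats_spec : Claim_equal_houseOfCats := by
  intro legs _
  unfold Spec_houseOfCats houseOfCats
  by_cases h0 : legs = 0
  · subst h0; decide
  · rw [if_neg h0]
    by_cases hneg : legs < 0
    · rw [houseOfCatsLoop, dif_neg (by omega)]
      unfold houseOfCats_alt
      rw [if_pos (Or.inl hneg)]
    · by_cases heven : (2 : Int) ∣ legs
      · rw [loop_eq legs heven 0 []]
        have hm2 : PySem.Int.mod legs 2 = 0 := (PySem.Int.mod_eq_zero_iff_dvd _ _).mpr heven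
        have hz : legs - 0 * 2 = legs := by ring
        unfold houseOfCats_alt
        have hnot : ¬ (legs < 0 ∨ PySem.Int.mod legs 2 ≠ 0) := by
          rintro (hx | hx)
          · omega
          · exact hx hm2
        rw [if_neg hnot, hz, List.nil_append]
        norm_num
      · rw [loop_of_odd legs 0 [] heven]
        have hm2 : PySem.Int.mod legs 2 ≠ 0 := fun hx =>
          heven ((PySem.Int.mod_eq_zero_iff_dvd _ _).mp hx)
        unfold houseOfCats_alt
        rw [if_pos (Or.inr hm2)]
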